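-- pv_equiv track=rewrite | github.com/pypi-data/pypi-mirror-320 | packages/ptcookiechecker/ptcookiechecker-0.0.8.tar.gz/ptcookiechecker-0.0.8/ptcookiechecker/modules/cookie_tester.py | detect_duplicate_attributes
-- ===== SOURCE A (Python) =====
-- def detect_duplicate_attributes(cookie_string):
--     attributes = [attr.strip() for attr in cookie_string.split(';')]
--     attribute_counts = {}
--     for attr in attributes:
--         key = attr.split('=')[0].strip().lower()  # Get the attribute name, case-insensitive
--         attribute_counts[key] = attribute_counts.get(key, 0) + 1
--     duplicates = {key.lower(): count for key, count in attribute_counts.items() if count > 1}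
--     return list(duplicates.keys())
-- ===== SOURCE B (Python) =====
-- def detect_duplicate_attributes(cookie_string):
--     keys = [attr.strip().split('=')[0].strip().lower()
--             for attr in cookie_string.split(';')]
--
--     def dup_heads(ks):
--         # Recursive partitioning: take the first key, delete every later
--         # occurrence of it; it is a duplicate iff something was deleted.
--         if not ks:
--             return []
--         head, tail = ks[0], ks[1:]
--         rest = [k for k in tail if k != head]
--         if len(rest) < len(tail):
--             return [head] + dup_heads(rest)
--         return dup_heads(rest)
--
--     return dup_heads(keys)
-- ===== Notes on version B (the rewrite author's own statement) =====
-- stated objective: alternative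
-- what changed: Replaces A's counter-dict pass plus dict-comprehension filter by a recursive partitioning of the normalized key list: repeatedly take the head key, delete all its later occurrences, and emit the head iff any occurrence was deleted; no counting and no dictionary at all.
import Mathlib
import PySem

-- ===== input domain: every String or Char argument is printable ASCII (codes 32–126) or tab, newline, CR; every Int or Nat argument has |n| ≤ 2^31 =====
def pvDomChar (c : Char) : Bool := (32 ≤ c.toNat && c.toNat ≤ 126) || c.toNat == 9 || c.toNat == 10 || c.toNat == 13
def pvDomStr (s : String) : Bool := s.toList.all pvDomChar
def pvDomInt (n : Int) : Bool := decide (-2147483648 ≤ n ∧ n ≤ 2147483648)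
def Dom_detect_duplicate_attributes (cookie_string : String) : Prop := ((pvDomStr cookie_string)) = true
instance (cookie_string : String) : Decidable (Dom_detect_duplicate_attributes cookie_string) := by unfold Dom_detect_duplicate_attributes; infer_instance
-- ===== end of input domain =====

-- B replaces A's counter dict plus dict-comprehension filter by a recursive partitioning of the
-- normalized key list (take the head, delete its later occurrences, emit it iff any were deleted);
-- objective: alternative.

-- s.split(sep) for a nonempty literal sep (exact: PySem.Chars.splitOn is Python's str.split(sep))
def pySplit (s sep : String) : List String :=
  (PySem.Chars.splitOn s.toList sep.toList).map String.ofList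

-- ===== PORT A =====
def detect_duplicate_attributes (cookie_string : String) : List String :=
  let attributes := (pySplit cookie_string ";").map (fun attr => PySem.Str.strip attr)
  let attribute_counts := attributes.foldl (fun d attr =>
      -- key = attr.split('=')[0].strip().lower(); split(sep) is never empty so [0] is headI, exact
      let key := PySem.Str.lower (PySem.Str.strip ((pySplit attr "=").headI))
      d.insert key (d.getD key 0 + 1)) (PySem.Dict.empty : PySem.Dict String Int)
  let duplicates := attribute_counts.items.foldl (fun d kv =>
      if 1 < kv.2 then d.insert (PySem.Str.lower kv.1) kv.2 else d)
      (PySem.Dict.empty : PySem.Dict String Int)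
  duplicates.keys

-- ===== PORT B =====
-- dup_heads of Source B: head/tail recursion, removing every later occurrence of the head
def dupHeads : List String → List String
  | [] => []
  | h :: t =>
    let rest := t.filter (fun k => k ≠ h)
    if rest.length < t.length then h :: dupHeads rest else dupHeads rest
termination_by l => l.length
decreasing_by all_goals simpa using Nat.lt_succ_of_le (by simpa using List.length_filter_le _ t.attach)

def detect_duplicate_attributes_alt (cookie_string : String) : List String :=
  let keys := (pySplit cookie_string ";").map (fun attr =>
      PySem.Str.lower (PySem.Str.strip ((pySplit (PySem.Str.strip attr) "=").headI)))
  dupHeads keys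

-- ===== PRECONDITION & SPEC =====
def Spec_detect_duplicate_attributes (cookie_string : String) (out : List String) : Prop := out = detect_duplicate_attributes_alt cookie_string
instance (cookie_string : String) (out : List String) : Decidable (Spec_detect_duplicate_attributes cookie_string out) := by unfold Spec_detect_duplicate_attributes; infer_instance

-- ===== CLAIM (what is proved, stated in full; the proofs are below) =====
def Claim_equal_detect_duplicate_attributes : Prop := ∀ (cookie_string : String), Dom_detect_duplicate_attributes cookie_string → Spec_detect_duplicate_attributes cookie_string (detect_duplicate_attributes cookie_string)

-- ===== LEMMAS AND PROOFS =====

theorem lowerChar_idem (c : Char) :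
    PySem.Chars.lowerChar (PySem.Chars.lowerChar c) = PySem.Chars.lowerChar c := by
  unfold PySem.Chars.lowerChar PySem.Chars.isupper
  by_cases h1 : ('A' : Char) ≤ c
  · by_cases h2 : c ≤ 'Z'
    · have hA : 65 ≤ c.toNat := by
        have h := UInt32.le_iff_toNat_le.mp (Char.le_def.mp h1)
        simpa using h
      have hZ : c.toNat ≤ 90 := by
        have h := UInt32.le_iff_toNat_le.mp (Char.le_def.mp h2)
        simpa using h
      have hvalid : (c.toNat + 32).isValidChar := Or.inl (by omega)
      have htn : (Char.ofNat (c.toNat + 32)).toNat = c.toNat + 32 := by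
        rw [Char.ofNat, dif_pos hvalid]
        show (Char.ofNatAux (c.toNat + 32) hvalid).val.toNat = c.toNat + 32
        rw [Char.ofNatAux]
        exact BitVec.toNat_ofNatLT _ _
      have hcond : (decide (('A' : Char) ≤ c) && decide (c ≤ 'Z')) = true := by simp [h1, h2]
      rw [if_pos hcond]
      have hx2 : ¬ ((Char.ofNat (c.toNat + 32)) ≤ 'Z') := by
        intro hle
        have h := UInt32.le_iff_toNat_le.mp (Char.le_def.mp hle)
        rw [Char.toNat_val, Char.toNat_val, htn] at h
        have hz : ('Z' : Char).toNat = 90 := rfl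
        omega
      simp [hx2]
    · have hcond : (decide (('A' : Char) ≤ c) && decide (c ≤ 'Z')) = false := by simp [h2]
      simp [hcond]
  · have hcond : (decide (('A' : Char) ≤ c) && decide (c ≤ 'Z')) = false := by simp [h1]
    simp [hcond]

theorem str_lower_idem (s : String) :
    PySem.Str.lower (PySem.Str.lower s) = PySem.Str.lower s := by
  simp [PySem.Str.lower, PySem.Chars.lower, String.toList_ofList, List.map_map,
        Function.comp_def, lowerChar_idem]

-- the normalized key of one raw attribute chunk (shared shape of both ports' key expression)
def pvKeyOf (a : String) : String :=
  PySem.Str.lower (PySem.Str.strip ((pySplit (PySem.Str.strip a) "=").headI))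

-- the key list of a cookie string
def pvKs (cookie_string : String) : List String := (pySplit cookie_string ";").map pvKeyOf

theorem pvKeyOf_lower (a : String) : PySem.Str.lower (pvKeyOf a) = pvKeyOf a :=
  str_lower_idem _

-- folding Set.add ignores elements already in the accumulator
theorem foldl_add_filter_mem (h : String) :
    ∀ (t : List String) (acc : List String), h ∈ acc →
      List.foldl PySem.Set.add acc t
        = List.foldl PySem.Set.add acc (t.filter (fun k => k ≠ h)) := by
  intro t
  induction t with
  | nil => intro acc _; rfl
  | cons k t ih =>
    intro acc hacc
    by_cases hk : k = h
    · subst hk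
      have hc : PySem.Set.contains acc k = true := by simp [PySem.Set.contains, hacc]
      have hadd : PySem.Set.add acc k = acc := by unfold PySem.Set.add; rw [if_pos hc]
      simp only [List.foldl_cons, hadd, List.filter_cons]
      rw [if_neg (by simp)]
      exact ih acc hacc
    · have hmemadd : h ∈ PySem.Set.add acc k := by
        unfold PySem.Set.add
        split
        · exact hacc
        · exact List.mem_append_left _ hacc
      simp only [List.foldl_cons, List.filter_cons]
      rw [if_pos (by simp [hk])]
      simp only [List.foldl_cons]
      exact ih _ hmemadd

-- folding Set.add over a list avoiding x commutes with a fresh head x of the accumulator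
theorem foldl_add_cons_fresh (x : String) :
    ∀ (t : List String) (s : List String), x ∉ t →
      List.foldl PySem.Set.add (x :: s) t = x :: List.foldl PySem.Set.add s t := by
  intro t
  induction t with
  | nil => intro s _; rfl
  | cons k t ih =>
    intro s hx
    have hkx : k ≠ x := fun h => hx (h ▸ List.mem_cons_self)
    have hxt : x ∉ t := fun h => hx (List.mem_cons_of_mem _ h)
    have hc : PySem.Set.contains (x :: s) k = PySem.Set.contains s k := by
      simp [PySem.Set.contains, hkx]
    have hstep : PySem.Set.add (x :: s) k = x :: PySem.Set.add s k := by
      unfold PySem.Set.add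
      rw [hc]
      split
      · rfl
      · rfl
    simp only [List.foldl_cons, hstep]
    exact ih _ hxt

theorem ofList_cons_filter (h : String) (t : List String) :
    PySem.Set.ofList (h :: t) = h :: PySem.Set.ofList (t.filter (fun k => k ≠ h)) := by
  have hstart : PySem.Set.ofList (h :: t) = List.foldl PySem.Set.add [h] t := by
    simp [PySem.Set.ofList, PySem.Set.add, PySem.Set.contains, PySem.Set.empty]
  rw [hstart, foldl_add_filter_mem h t [h] List.mem_cons_self,
      foldl_add_cons_fresh h _ [] (by simp)]
  rfl

-- B's recursion computes the count>1 filter of the first-occurrence dedup list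
theorem dupHeads_eq_aux : ∀ (n : Nat) (ks : List String), ks.length ≤ n →
    dupHeads ks
      = (PySem.Set.ofList ks).filter (fun k => decide (1 < List.count k ks)) := by
  intro n
  induction n with
  | zero =>
    intro ks hks
    have : ks = [] := List.eq_nil_of_length_eq_zero (Nat.le_zero.mp hks)
    subst this
    rw [dupHeads]
    rfl
  | succ n ih =>
    intro ks hks
    match ks with
    | [] => rw [dupHeads]; rfl
    | h :: t =>
      rw [dupHeads]
      set rest := t.filter (fun k => k ≠ h) with hrest
      have hrlen : rest.length ≤ n := by
        have h1 : rest.length ≤ t.length := List.length_filter_le _ t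
        simp only [List.length_cons] at hks
        omega
      have ihr := ih rest hrlen
      rw [ofList_cons_filter h t, ← hrest, List.filter_cons]
      have htail : (PySem.Set.ofList rest).filter (fun k => decide (1 < List.count k (h :: t)))
          = dupHeads rest := by
        rw [ihr]
        apply List.filter_congr
        intro k hk
        have hkrest : k ∈ rest := (PySem.Set.mem_ofList rest k).mp hk
        have hkne : k ≠ h := by
          have := (List.mem_filter.mp (hrest ▸ hkrest)).2
          simpa using this
        have h1 : List.count k (h :: t) = List.count k t := by
          simp [Ne.symm hkne]
        have h2 : List.count k rest = List.count k t := by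
          rw [hrest]
          exact List.count_filter (by simp [hkne])
        rw [h1, ← h2]
      have hlen : rest.length < t.length ↔ h ∈ t := by
        constructor
        · intro hl
          by_contra hmem
          have : rest = t := by
            rw [hrest]
            exact List.filter_eq_self.mpr (fun k hk => by
              simp only [decide_eq_true_eq]
              exact fun he => hmem (he ▸ hk))
          have := congrArg List.length this
          omega
        · intro hmem
          have hlt : List.count h rest = 0 :=
            List.count_eq_zero.mpr (by rw [hrest]; simp)
          have hle : rest.length ≤ t.length := hrest ▸ List.length_filter_le _ t
          have hcount : 0 < List.count h t := List.count_pos_iff.mpr hmem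
          rcases Nat.lt_or_ge rest.length t.length with hc | hc
          · exact hc
          · exfalso
            have : rest = t := by
              rw [hrest]
              exact (List.filter_sublist).eq_of_length_le (by omega)
            rw [this] at hlt
            omega
      have hcnt : (decide (1 < List.count h (h :: t)) = true) ↔ h ∈ t := by
        simp [List.count_cons_self, List.count_pos_iff]
      by_cases hm : h ∈ t
      · rw [if_pos (hlen.mpr hm), if_pos (hcnt.mpr hm), htail]
      · rw [if_neg (fun hc => hm (hlen.mp hc)), if_neg (fun hc => hm (hcnt.mp hc)), htail]

theorem dupHeads_eq (ks : List String) :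
    dupHeads ks
      = (PySem.Set.ofList ks).filter (fun k => decide (1 < List.count k ks)) :=
  dupHeads_eq_aux ks.length ks (Nat.le_refl _)

theorem alt_eq_filter (cookie_string : String) :
    detect_duplicate_attributes_alt cookie_string
      = (PySem.Set.ofList (pvKs cookie_string)).filter
          (fun k => decide (1 < List.count k (pvKs cookie_string))) := by
  show dupHeads (pvKs cookie_string) = _
  exact dupHeads_eq _

theorem a_eq_filter (cookie_string : String) :
    detect_duplicate_attributes cookie_string
      = (PySem.Set.ofList (pvKs cookie_string)).filter
          (fun k => decide (1 < List.count k (pvKs cookie_string))) := by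
  show ((((pySplit cookie_string ";").map (fun attr => PySem.Str.strip attr)).foldl
      (fun d attr =>
        let key := PySem.Str.lower (PySem.Str.strip ((pySplit attr "=").headI))
        d.insert key (d.getD key 0 + 1)) (PySem.Dict.empty : PySem.Dict String Int)).items.foldl
      (fun d kv => if 1 < kv.2 then d.insert (PySem.Str.lower kv.1) kv.2 else d)
      (PySem.Dict.empty : PySem.Dict String Int)).keys
    = (PySem.Set.ofList (pvKs cookie_string)).filter
        (fun k => decide (1 < List.count k (pvKs cookie_string)))
  have h1 : ((pySplit cookie_string ";").map (fun attr => PySem.Str.strip attr)).foldl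
      (fun d attr =>
        let key := PySem.Str.lower (PySem.Str.strip ((pySplit attr "=").headI))
        d.insert key (d.getD key 0 + 1)) (PySem.Dict.empty : PySem.Dict String Int)
      = PySem.Dict.counter (pvKs cookie_string) := by
    rw [List.foldl_map, ← PySem.Dict.foldl_insert_getD_add_one_eq_counter]
    unfold pvKs
    rw [List.foldl_map]
    rfl
  rw [h1]
  have h2 : (fun (d : PySem.Dict String Int) (kv : String × Int) =>
      if 1 < kv.2 then d.insert (PySem.Str.lower kv.1) kv.2 else d)
      = (fun d kv => if (fun (kv : String × Int) => decide (1 < kv.2)) kv = true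
          then d.insert (PySem.Str.lower kv.1) kv.2 else d) := by
    funext d kv; simp
  rw [h2, ← List.foldl_filter, PySem.Dict.items_counter, List.filter_map]
  set S := ((PySem.Set.ofList (pvKs cookie_string)).filter
      ((fun (kv : String × Int) => decide (1 < kv.2)) ∘
       (fun k => (k, (List.count k (pvKs cookie_string) : Int))))) with hS
  have hSmem : ∀ x ∈ S, PySem.Str.lower x = x := by
    intro x hx
    have hx1 : x ∈ PySem.Set.ofList (pvKs cookie_string) := (List.mem_filter.mp hx).1
    have hx2 : x ∈ pvKs cookie_string := (PySem.Set.mem_ofList _ x).mp hx1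
    obtain ⟨a, _, rfl⟩ := List.mem_map.mp hx2
    exact pvKeyOf_lower a
  have hnodupS : S.Nodup := (PySem.Set.nodup_ofList _).filter _
  have hmapS : S.map PySem.Str.lower = S := (List.map_congr_left hSmem).trans (List.map_id _)
  have hfresh' : (List.foldl
      (fun (d : PySem.Dict String Int) (kv : String × Int) => d.insert (PySem.Str.lower kv.1) kv.2)
      PySem.Dict.empty (S.map (fun k => (k, (List.count k (pvKs cookie_string) : Int))))).items
      = (S.map (fun k => (k, (List.count k (pvKs cookie_string) : Int)))).map
          (fun kv => (PySem.Str.lower kv.1, kv.2)) := by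
    have h := PySem.Dict.items_foldl_insert_fresh
        (S.map (fun k => (k, (List.count k (pvKs cookie_string) : Int))))
        (fun kv : String × Int => PySem.Str.lower kv.1) (fun kv : String × Int => kv.2)
        PySem.Dict.empty
        (fun a _ => rfl)
        (by
          rw [List.map_map]
          have he : ((fun (kv : String × Int) => PySem.Str.lower kv.1) ∘
              (fun k => (k, (List.count k (pvKs cookie_string) : Int)))) = PySem.Str.lower := rfl
          rw [he, hmapS]
          exact hnodupS)
    simpa using h
  have hkeys : ∀ (d : PySem.Dict String Int), d.keys = d.items.map (fun p => p.1) := fun _ => rfl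
  rw [hkeys, hfresh']
  rw [List.map_map, List.map_map]
  have hcomp : (((fun (p : String × Int) => p.1) ∘ (fun (kv : String × Int) =>
      (PySem.Str.lower kv.1, kv.2))) ∘ (fun k => (k, (List.count k (pvKs cookie_string) : Int))))
      = PySem.Str.lower := rfl
  rw [hcomp, hmapS, hS]
  apply List.filter_congr
  intro x _
  simp only [Function.comp_apply, decide_eq_decide]
  exact Nat.one_lt_cast

-- ===== VERDICT (by name: the statement is the Claim_ definition above) =====
theorem detect_duplicate_attributes_spec : Claim_equal_detect_duplicate_attributes := by
  intro cookie_string _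
  unfold Spec_detect_duplicate_attributes
  rw [a_eq_filter, alt_eq_filter]
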